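-- pv_equiv track=rewrite | github.com/ThatPerson/Ising | main.py | get_potential
-- ===== SOURCE A (Python) =====
-- def get_potential(m):
--     pot = 0
--     for i in range(0, len(m)):
--            for j in range(0, len(m[i])):
--                 se = m[i][j]
--                 if (i > 0):
--                     lex = i - 1
--                 else:
--                     lex = len(m) - 1
--                 if (i < len(m) - 1):
--                     mex = i + 1
--                 else:
--                     mex = 0
--                 if (j > 0):
--                     ley = j - 1
--                 else:
--                     ley = len(m[i]) - 1
--                 if (j < len(m[i]) - 1):
--                     mey = j + 1
--                 else:
--                     mey = 0
--                 if (se == m[lex][j]):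
--                     pot = pot - 2
--                 if (se == m[mex][j]):
--                     pot = pot - 2
--                 if (se == m[i][ley]):
--                     pot = pot - 2
--                 if (se == m[i][mey]):
--                     pot = pot - 2
--                 pot = pot + 4
--     return pot
-- ===== SOURCE B (Python) =====
-- def get_potential(m):
--     N = sum(len(row) for row in m)
--     vert = sum(a != b
--                for row, nrow in zip(m, m[1:] + m[:1])
--                for a, b in zip(row, nrow))
--     horiz = sum(a != b
--                 for row in m
--                 for a, b in zip(row, row[1:] + row[:1]))
--     return 4 * (vert + horiz) - 4 * N
-- ===== Notes on version B (the rewrite author's own statement) =====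
-- stated objective: faster
-- what changed: B is index-free and staged: it computes the total size N, then counts mismatching pairs by zipping the grid with its row-rotation m[1:]+m[:1] and each row with its own rotation, returning the closed form 4*(vert+horiz)-4*N, instead of A's per-cell four-neighbour indexed scan with explicit wraparound arithmetic; Pre_ excludes ragged grids, on which A raises IndexError.
import Mathlib
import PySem

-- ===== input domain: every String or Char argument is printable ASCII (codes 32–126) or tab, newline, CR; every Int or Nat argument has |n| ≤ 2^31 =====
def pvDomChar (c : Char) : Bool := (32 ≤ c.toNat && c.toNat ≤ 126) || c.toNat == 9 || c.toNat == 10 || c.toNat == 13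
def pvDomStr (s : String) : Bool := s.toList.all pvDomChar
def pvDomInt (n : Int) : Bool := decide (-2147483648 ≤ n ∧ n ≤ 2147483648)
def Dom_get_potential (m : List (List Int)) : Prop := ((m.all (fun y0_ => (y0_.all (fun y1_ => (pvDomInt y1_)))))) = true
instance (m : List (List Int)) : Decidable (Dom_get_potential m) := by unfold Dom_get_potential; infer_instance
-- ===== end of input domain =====

-- B replaces A's per-cell four-neighbour indexed scan by three staged index-free passes
-- (total size, then mismatches against the row-rotated grid, then mismatches against each
-- column-rotated row via zip) combined in the closed form 4*(vert+horiz) - 4*N (objective: faster, constant factor).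

-- ===== PORT A =====
def get_potential (m : List (List Int)) : Int :=
  (PySem.List.pyRange 0 (m.length : Int) 1).foldl (fun pot i =>
    (PySem.List.pyRange 0 ((PySem.List.pyGetD m i []).length : Int) 1).foldl (fun pot j =>
      let se := PySem.List.pyGetD (PySem.List.pyGetD m i []) j 0
      let lex : Int := if 0 < i then i - 1 else (m.length : Int) - 1
      let mex : Int := if i < (m.length : Int) - 1 then i + 1 else 0
      let ley : Int := if 0 < j then j - 1 else ((PySem.List.pyGetD m i []).length : Int) - 1
      let mey : Int := if j < ((PySem.List.pyGetD m i []).length : Int) - 1 then j + 1 else 0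
      let pot := if se = PySem.List.pyGetD (PySem.List.pyGetD m lex []) j 0 then pot - 2 else pot
      let pot := if se = PySem.List.pyGetD (PySem.List.pyGetD m mex []) j 0 then pot - 2 else pot
      let pot := if se = PySem.List.pyGetD (PySem.List.pyGetD m i []) ley 0 then pot - 2 else pot
      let pot := if se = PySem.List.pyGetD (PySem.List.pyGetD m i []) mey 0 then pot - 2 else pot
      pot + 4) pot) 0

-- ===== PORT B =====
-- xs[1:] + xs[:1] is PySem.List.slice xs (some 1) none ++ PySem.List.slice xs none (some 1);
-- sum(bool-generator) is the sum of 0/1 mapped over the zipped lists.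
def get_potential_alt (m : List (List Int)) : Int :=
  let N : Int := (m.map (fun row => (row.length : Int))).sum
  let vert : Int :=
    ((m.zip (PySem.List.slice m (some 1) none ++ PySem.List.slice m none (some 1))).map
      (fun p => ((p.1.zip p.2).map (fun q => if q.1 ≠ q.2 then (1:Int) else 0)).sum)).sum
  let horiz : Int :=
    (m.map (fun row =>
      ((row.zip (PySem.List.slice row (some 1) none ++ PySem.List.slice row none (some 1))).map
        (fun q => if q.1 ≠ q.2 then (1:Int) else 0)).sum)).sum
  4 * (vert + horiz) - 4 * N

-- ===== PRECONDITION & SPEC =====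
-- Pre_ excludes exactly the ragged grids (rows of unequal length): on every such grid the
-- Python A raises IndexError (its wrap-around cross-row lookups run off a shorter row).
def Pre_get_potential (m : List (List Int)) : Prop :=
  ∀ r ∈ m, r.length = (m.headD []).length
instance (m : List (List Int)) : Decidable (Pre_get_potential m) := by
  unfold Pre_get_potential; infer_instance
def pvWitness_get_potential : List (List Int) := [[1, -1], [1, 1]]

def Spec_get_potential (m : List (List Int)) (out : Int) : Prop := out = get_potential_alt m
instance (m : List (List Int)) (out : Int) : Decidable (Spec_get_potential m out) := by
  unfold Spec_get_potential; infer_instance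

-- ===== CLAIM (what is proved, stated in full; the proofs are below) =====
def Claim_equal_get_potential : Prop := ∀ (m : List (List Int)), Dom_get_potential m → Pre_get_potential m → Spec_get_potential m (get_potential m)

-- ===== LEMMAS AND PROOFS =====

-- value of cell (i,j), Nat-indexed
def vAt (m : List (List Int)) (i j : Nat) : Int := (m.getD i []).getD j 0

-- 0/1 indicators of a match with the up/down/left/right neighbour (periodic)
def eU (m : List (List Int)) (i j : Nat) : Int :=
  if vAt m i j = vAt m (if i = 0 then m.length - 1 else i - 1) j then 1 else 0
def eD (m : List (List Int)) (i j : Nat) : Int :=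
  if vAt m i j = vAt m (if i = m.length - 1 then 0 else i + 1) j then 1 else 0
def eL (m : List (List Int)) (i j : Nat) : Int :=
  if vAt m i j = vAt m i (if j = 0 then (m.getD i []).length - 1 else j - 1) then 1 else 0
def eR (m : List (List Int)) (i j : Nat) : Int :=
  if vAt m i j = vAt m i (if j = (m.getD i []).length - 1 then 0 else j + 1) then 1 else 0

def cA (m : List (List Int)) (i j : Nat) : Int :=
  4 - 2 * eU m i j - 2 * eD m i j - 2 * eL m i j - 2 * eR m i j
def cB (m : List (List Int)) (i j : Nat) : Int := eD m i j + eR m i j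

lemma pv_getD_pred {a : Type} (xs : List a) (k : Nat) (hk : k < xs.length) (d : a) :
    PySem.List.pyGetD xs (if (0:Int) < (k:Int) then (k:Int) - 1 else (xs.length:Int) - 1) d
      = xs.getD (if k = 0 then xs.length - 1 else k - 1) d := by
  by_cases h : k = 0
  · subst h
    rw [if_neg (by omega), if_pos rfl,
        show ((xs.length:Int) - 1) = ((xs.length - 1 : Nat) : Int) by omega,
        PySem.List.pyGetD_natCast]
  · rw [if_pos (by omega), if_neg h,
        show ((k:Int) - 1) = ((k - 1 : Nat) : Int) by omega,
        PySem.List.pyGetD_natCast]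

lemma pv_getD_succ {a : Type} (xs : List a) (k : Nat) (hk : k < xs.length) (d : a) :
    PySem.List.pyGetD xs (if (k:Int) < (xs.length:Int) - 1 then (k:Int) + 1 else 0) d
      = xs.getD (if k = xs.length - 1 then 0 else k + 1) d := by
  by_cases h : k = xs.length - 1
  · rw [if_neg (by omega), if_pos h, show ((0:Int)) = ((0 : Nat) : Int) by omega,
        PySem.List.pyGetD_natCast]
  · rw [if_pos (by omega), if_neg h,
        show ((k:Int) + 1) = ((k + 1 : Nat) : Int) by omega,
        PySem.List.pyGetD_natCast]

-- a foldl whose body adds a per-element amount is the initial value plus a sum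
lemma foldl_body_add {a : Type} (l : List a) (f : Int → a → Int) (g : a → Int) (init : Int)
    (h : ∀ acc, ∀ x ∈ l, f acc x = acc + g x) : l.foldl f init = init + (l.map g).sum := by
  rw [PySem.List.foldl_congr_mem l f (fun acc x => acc + g x) init h, PySem.List.foldl_add]

lemma sum_map_range (n : Nat) (f : Nat → Int) :
    ((List.range n).map f).sum = ∑ i ∈ Finset.range n, f i := rfl

-- A's value as a double sum of per-cell contributions
lemma A_eq (m : List (List Int)) :
    get_potential m
      = ((List.range m.length).map
          (fun i => ((List.range (m.getD i []).length).map (fun j => cA m i j)).sum)).sum := by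
  unfold get_potential
  rw [PySem.List.pyRange_zero_nat, List.foldl_map,
      foldl_body_add _ _ (fun i => ((List.range (m.getD i []).length).map (fun j => cA m i j)).sum)]
  · ring
  intro pot k hk
  rw [List.mem_range] at hk
  simp only [PySem.List.pyGetD_natCast]
  rw [PySem.List.pyRange_zero_nat, List.foldl_map,
      foldl_body_add _ _ (fun j => cA m k j)]
  intro acc l hl
  rw [List.mem_range] at hl
  simp only [PySem.List.pyGetD_natCast, pv_getD_pred m k hk, pv_getD_succ m k hk,
             pv_getD_pred (m.getD k []) l hl, pv_getD_succ (m.getD k []) l hl,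
             PySem.List.pyGetD_natCast]
  unfold cA eU eD eL eR vAt
  split_ifs <;> ring

-- the rotation xs[1:] + xs[:1], elementwise
lemma rot_getD {a : Type} (xs : List a) (k : Nat) (hk : k < xs.length) (d : a) :
    (xs.drop 1 ++ xs.take 1).getD k d
      = xs.getD (if k = xs.length - 1 then 0 else k + 1) d := by
  by_cases h : k = xs.length - 1
  · rw [if_pos h, List.getD_eq_getElem?_getD, List.getD_eq_getElem?_getD,
        List.getElem?_append_right (by simp; omega)]
    simp [h]
  · rw [if_neg h, List.getD_eq_getElem?_getD, List.getD_eq_getElem?_getD,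
        List.getElem?_append_left (by simp; omega), List.getElem?_drop, Nat.add_comm 1 k]

lemma rot_length {a : Type} (xs : List a) : (xs.drop 1 ++ xs.take 1).length = xs.length := by
  simp; omega

-- a mapped sum over a zip of equal-length lists as a range sum of indexed terms
lemma zip_sum {a b : Type} (xs : List a) (ys : List b) (f : a × b → Int) (dx : a) (dy : b)
    (h : xs.length = ys.length) :
    ((xs.zip ys).map f).sum = ∑ j ∈ Finset.range xs.length, f (xs.getD j dx, ys.getD j dy) := by
  induction xs generalizing ys with
  | nil => simp
  | cons x xs ih =>
    cases ys with
    | nil => simp at h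
    | cons y ys =>
      simp only [List.zip_cons_cons, List.map_cons, List.sum_cons, List.length_cons]
      rw [ih ys (by simpa using h), Finset.sum_range_succ']
      simp [add_comm]

-- a mapped sum as a range sum of indexed terms
lemma map_sum_range' {a : Type} (xs : List a) (g : a → Int) (d : a) :
    (xs.map g).sum = ∑ j ∈ Finset.range xs.length, g (xs.getD j d) := by
  induction xs with
  | nil => simp
  | cons x xs ih =>
    simp only [List.map_cons, List.sum_cons, List.length_cons]
    rw [ih, Finset.sum_range_succ']
    simp [add_comm]

-- mismatch indicator is the complement of the match indicator
lemma mismatch_eq {a : Type} [DecidableEq a] (x y : a) :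
    (if x ≠ y then (1:Int) else 0) = 1 - (if x = y then (1:Int) else 0) := by
  split_ifs <;> simp_all

-- B's value as 4*N - 4*(double sum of edge matches), on rectangular grids
lemma B_eq (m : List (List Int)) (hpre : Pre_get_potential m) :
    get_potential_alt m
      = 4 * ((List.range m.length).map (fun i => ((m.getD i []).length : Int))).sum
        - 4 * ((List.range m.length).map
            (fun i => ((List.range (m.getD i []).length).map (fun j => cB m i j)).sum)).sum := by
  have hL : ∀ i, i < m.length → (m.getD i []).length = (m.headD []).length := by
    intro i hi
    have hm : m.getD i [] = m[i] := by
      rw [List.getD_eq_getElem?_getD, List.getElem?_eq_getElem hi, Option.getD_some]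
    rw [hm]; exact hpre _ (List.getElem_mem hi)
  have hslice : ∀ {a : Type} (xs : List a),
      PySem.List.slice xs (some 1) none ++ PySem.List.slice xs none (some 1)
        = xs.drop 1 ++ xs.take 1 := by
    intro a xs
    rw [show (1:Int) = ((1:Nat):Int) by norm_num,
        PySem.List.slice_from_natCast, PySem.List.slice_to_natCast]
  unfold get_potential_alt
  dsimp only
  simp only [hslice]
  rw [zip_sum m (m.drop 1 ++ m.take 1) _ [] [] (rot_length m).symm,
      map_sum_range' m _ [], map_sum_range' m (fun row => (row.length : Int)) []]
  simp only [sum_map_range]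
  have hvert : ∀ i ∈ Finset.range m.length,
      ((((m.getD i []).zip ((m.drop 1 ++ m.take 1).getD i [])).map
          (fun q => if q.1 ≠ q.2 then (1:Int) else 0)).sum)
        = ((m.getD i []).length : Int)
          - ∑ j ∈ Finset.range (m.getD i []).length, eD m i j := by
    intro i hi
    rw [Finset.mem_range] at hi
    rw [rot_getD m i hi []]
    have hlen : (m.getD i []).length
        = (m.getD (if i = m.length - 1 then 0 else i + 1) []).length := by
      rw [hL i hi, hL _ (by split_ifs <;> omega)]
    rw [zip_sum _ _ _ 0 0 hlen]
    have : ∀ j ∈ Finset.range (m.getD i []).length,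
        (if (m.getD i []).getD j 0
            ≠ (m.getD (if i = m.length - 1 then 0 else i + 1) []).getD j 0 then (1:Int) else 0)
          = 1 - eD m i j := by
      intro j _
      rw [mismatch_eq]
      unfold eD vAt
      rfl
    rw [Finset.sum_congr rfl this, Finset.sum_sub_distrib]
    simp
  have hhoriz : ∀ i ∈ Finset.range m.length,
      ((((m.getD i []).zip ((m.getD i []).drop 1 ++ (m.getD i []).take 1)).map
          (fun q => if q.1 ≠ q.2 then (1:Int) else 0)).sum)
        = ((m.getD i []).length : Int)
          - ∑ j ∈ Finset.range (m.getD i []).length, eR m i j := by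
    intro i _
    rw [zip_sum _ _ _ 0 0 (rot_length (m.getD i [])).symm]
    have : ∀ j ∈ Finset.range (m.getD i []).length,
        (if (m.getD i []).getD j 0
            ≠ ((m.getD i []).drop 1 ++ (m.getD i []).take 1).getD j 0 then (1:Int) else 0)
          = 1 - eR m i j := by
      intro j hj
      rw [Finset.mem_range] at hj
      rw [rot_getD _ j hj 0, mismatch_eq]
      unfold eR vAt
      rfl
    rw [Finset.sum_congr rfl this, Finset.sum_sub_distrib]
    simp
  rw [Finset.sum_congr rfl hvert, Finset.sum_congr rfl hhoriz]
  simp only [cB, Finset.sum_add_distrib, Finset.sum_sub_distrib]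
  ring

-- cyclic re-indexing: matching the predecessor vs matching the successor
lemma rowflip (v : Nat → Int) (N : Nat) :
    (∑ i ∈ Finset.range N, if v i = v (if i = 0 then N - 1 else i - 1) then (1:Int) else 0)
      = ∑ i ∈ Finset.range N, if v i = v (if i = N - 1 then 0 else i + 1) then (1:Int) else 0 := by
  rcases Nat.eq_zero_or_pos N with h | h
  · subst h; simp
  have step : ∀ i ∈ Finset.range N,
      (if v i = v (if i = 0 then N - 1 else i - 1) then (1:Int) else 0)
        = (fun a => if v a = v (if a = N - 1 then 0 else a + 1) then (1:Int) else 0)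
            (if i = 0 then N - 1 else i - 1) := by
    intro i hi
    rw [Finset.mem_range] at hi
    dsimp only
    rw [show (if (if i = 0 then N - 1 else i - 1) = N - 1 then 0
              else (if i = 0 then N - 1 else i - 1) + 1) = i by split_ifs <;> omega]
    by_cases hv : v i = v (if i = 0 then N - 1 else i - 1)
    · rw [if_pos hv, if_pos hv.symm]
    · rw [if_neg hv, if_neg fun hc => hv hc.symm]
  rw [Finset.sum_congr rfl step]
  exact Finset.sum_nbij' (fun a => if a = 0 then N - 1 else a - 1)
    (fun a => if a = N - 1 then 0 else a + 1)
    (fun a ha => by rw [Finset.mem_range] at *; dsimp only; split_ifs <;> omega)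
    (fun a ha => by rw [Finset.mem_range] at *; dsimp only; split_ifs <;> omega)
    (fun a ha => by rw [Finset.mem_range] at ha; dsimp only; split_ifs <;> omega)
    (fun a ha => by
      rw [Finset.mem_range] at ha; dsimp only
      by_cases h1 : a = N - 1 <;> simp [h1])
    (fun a ha => rfl)

-- ===== VERDICT =====
theorem get_potential_spec : Claim_equal_get_potential := by
  intro m _ hpre
  unfold Spec_get_potential
  rw [A_eq, B_eq m hpre]
  simp only [sum_map_range]
  have hL : ∀ i, i < m.length → (m.getD i []).length = (m.headD []).length := by
    intro i hi
    have hm : m.getD i [] = m[i] := by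
      rw [List.getD_eq_getElem?_getD, List.getElem?_eq_getElem hi, Option.getD_some]
    rw [hm]; exact hpre _ (List.getElem_mem hi)
  have G2 : ∀ i ∈ Finset.range m.length,
      (∑ j ∈ Finset.range (m.getD i []).length, eL m i j)
        = ∑ j ∈ Finset.range (m.getD i []).length, eR m i j := by
    intro i _
    simpa [eL, eR] using rowflip (fun j => vAt m i j) (m.getD i []).length
  have G1 : (∑ i ∈ Finset.range m.length, ∑ j ∈ Finset.range (m.getD i []).length, eU m i j)
      = ∑ i ∈ Finset.range m.length, ∑ j ∈ Finset.range (m.getD i []).length, eD m i j := by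
    calc (∑ i ∈ Finset.range m.length, ∑ j ∈ Finset.range (m.getD i []).length, eU m i j)
        = ∑ i ∈ Finset.range m.length, ∑ j ∈ Finset.range (m.headD []).length, eU m i j :=
          Finset.sum_congr rfl (fun i hi => by rw [hL i (Finset.mem_range.mp hi)])
      _ = ∑ j ∈ Finset.range (m.headD []).length, ∑ i ∈ Finset.range m.length, eU m i j :=
          Finset.sum_comm
      _ = ∑ j ∈ Finset.range (m.headD []).length, ∑ i ∈ Finset.range m.length, eD m i j :=
          Finset.sum_congr rfl (fun j _ => by
            simpa [eU, eD] using rowflip (fun i => vAt m i j) m.length)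
      _ = ∑ i ∈ Finset.range m.length, ∑ j ∈ Finset.range (m.headD []).length, eD m i j :=
          Finset.sum_comm
      _ = ∑ i ∈ Finset.range m.length, ∑ j ∈ Finset.range (m.getD i []).length, eD m i j :=
          Finset.sum_congr rfl (fun i hi => by rw [hL i (Finset.mem_range.mp hi)])
  have hSL : (∑ i ∈ Finset.range m.length, ∑ j ∈ Finset.range (m.getD i []).length, eL m i j)
      = ∑ i ∈ Finset.range m.length, ∑ j ∈ Finset.range (m.getD i []).length, eR m i j :=
    Finset.sum_congr rfl G2
  simp only [cA, cB, Finset.sum_sub_distrib, Finset.sum_add_distrib, ← Finset.mul_sum,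
             Finset.sum_const, nsmul_eq_mul, Finset.card_range]
  rw [G1, hSL]
  have hsm : (∑ i ∈ Finset.range m.length, ((m.getD i []).length : Int)) * 4
      = ∑ i ∈ Finset.range m.length, ((m.getD i []).length : Int) * 4 := by rw [Finset.sum_mul]
  linarith [hsm]
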